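-- pv_equiv track=rewrite | github.com/cttmayi/pylib | pylib/basic/re_exp/re_exp.py | re_exp
-- ===== SOURCE A (Python) =====
-- _values = {
--     'x': r'([\da-fA-F]{1,})', # 16进制的数字, 不包括前面的0x, 比如 F9, 55
--     'd': r'([+-]{0,1}\d{1,})', # 10进制的数字
--     's': r'([\da-zA-Z\.]{1,}[\da-zA-Z]{1,})', # 字符串
--     'a': r'(.+)',
--     'X': r'[\da-fA-F]{1,}',
--     'D': r'[+-]{0,1}\d{1,}',
--     'S': r'[\da-zA-Z\.]{1,}[\da-zA-Z]{1,}',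
--     'a': r'.+',
-- }
--
-- def re_exp(cond):
--     cond_arr = []
--     is_replace = False
--     for i in range(len(cond)):
--         c = cond[i]
--         if c == '%':
--             is_replace = True
--         elif is_replace:
--             if c in _values.keys():
--                 cond_arr.append(_values[c])
--             elif c in ['0', '1']:
--                 cond_arr.append('%')
--                 cond_arr.append(c)
--             is_replace = False
--         elif c in [ '(', ')', '\\', '[', ']', '-', '.']:
--             cond_arr.append('\\')
--             cond_arr.append(c)
--         else:
--             cond_arr.append(c)
--
--     cond =  ''.join(cond_arr)
--     return cond
-- ===== SOURCE B (Python) =====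
-- _values = {
--     'x': r'([\da-fA-F]{1,})', # 16进制的数字, 不包括前面的0x, 比如 F9, 55
--     'd': r'([+-]{0,1}\d{1,})', # 10进制的数字
--     's': r'([\da-zA-Z\.]{1,}[\da-zA-Z]{1,})', # 字符串
--     'a': r'(.+)',
--     'X': r'[\da-fA-F]{1,}',
--     'D': r'[+-]{0,1}\d{1,}',
--     'S': r'[\da-zA-Z\.]{1,}[\da-zA-Z]{1,}',
--     'a': r'.+',
-- }
--
-- def re_exp(cond):
--     # Consume the string suffix-by-suffix: a run of '%'s is stripped in one
--     # step and the single character after it decides the replacement.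
--     out = []
--     s = cond
--     while s:
--         c = s[0]
--         if c == '%':
--             s = s.lstrip('%')
--             if s:
--                 out.append(_values.get(s[0], '%' + s[0] if s[0] in '01' else ''))
--                 s = s[1:]
--         elif c in '()\\[]-.':
--             out.append('\\' + c)
--             s = s[1:]
--         else:
--             out.append(c)
--             s = s[1:]
--     return ''.join(out)
-- ===== Notes on version B (the rewrite author's own statement) =====
-- stated objective: alternative
-- what changed: A scans one character at a time with a boolean is_replace flag that persists across iterations; B recursively consumes whole suffixes, stripping each run of '%'s in one lstrip step and resolving the single following character via dict.get with a default, so no cross-iteration flag state exists.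
import Mathlib
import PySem

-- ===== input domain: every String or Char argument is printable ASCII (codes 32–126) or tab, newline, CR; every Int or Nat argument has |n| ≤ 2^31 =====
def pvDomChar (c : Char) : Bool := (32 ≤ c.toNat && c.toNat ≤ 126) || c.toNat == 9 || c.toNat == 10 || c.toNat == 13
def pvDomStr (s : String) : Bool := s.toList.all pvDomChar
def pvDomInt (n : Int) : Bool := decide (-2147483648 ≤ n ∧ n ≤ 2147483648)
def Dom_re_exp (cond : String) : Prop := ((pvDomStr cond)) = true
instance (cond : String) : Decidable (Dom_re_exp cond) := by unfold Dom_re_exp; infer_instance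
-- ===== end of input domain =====

-- B replaces A's per-character loop with a persistent is_replace flag by a suffix recursion
-- that strips each '%'-run in one step (objective: alternative structure, no speed claim).

-- ===== PORT A =====
-- the module-level _values dict (duplicate key 'a': the later value overwrites, position kept)
def reExpValues : PySem.Dict Char (List Char) :=
  PySem.Dict.ofList [
    ('x', "([\\da-fA-F]{1,})".toList),
    ('d', "([+-]{0,1}\\d{1,})".toList),
    ('s', "([\\da-zA-Z\\.]{1,}[\\da-zA-Z]{1,})".toList),
    ('a', "(.+)".toList),
    ('X', "[\\da-fA-F]{1,}".toList),
    ('D', "[+-]{0,1}\\d{1,}".toList),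
    ('S', "[\\da-zA-Z\\.]{1,}[\\da-zA-Z]{1,}".toList),
    ('a', ".+".toList)]

-- loop body of A: state = (cond_arr, is_replace)
def reExpStepA (st : List (List Char) × Bool) (c : Char) : List (List Char) × Bool :=
  if c = '%' then (st.1, true)
  else if st.2 then
    match reExpValues.get? c with
    | some v => (st.1 ++ [v], false)
    | none => if c = '0' ∨ c = '1' then (st.1 ++ [['%'], [c]], false) else (st.1, false)
  else if c ∈ ['(', ')', '\\', '[', ']', '-', '.'] then (st.1 ++ [['\\'], [c]], false)
  else (st.1 ++ [[c]], false)

def re_exp (cond : String) : String :=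
  String.ofList ((cond.toList.foldl reExpStepA ([], false)).1.flatten)

-- ===== PORT B =====
-- _values.get(c, '%' + c if c in '01' else '')
def reExpRep (c : Char) : List Char :=
  match reExpValues.get? c with
  | some v => v
  | none => if c = '0' ∨ c = '1' then ['%', c] else []

-- B's while loop over the shrinking suffix; s.lstrip('%') is ported by hand as
-- dropWhile (· = '%'), exact because the strip set is the single character '%'.
def reExpGo : List Char → List Char
  | [] => []
  | c :: cs =>
    if c = '%' then
      match h : (c :: cs).dropWhile (fun x => x = '%') with
      | [] => []
      | c2 :: rest => reExpRep c2 ++ reExpGo rest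
    else if c ∈ ['(', ')', '\\', '[', ']', '-', '.'] then '\\' :: c :: reExpGo cs
    else c :: reExpGo cs
termination_by cs => cs.length
decreasing_by
  all_goals first
    | (have hle := List.length_dropWhile_le (fun x => x = '%') (c :: cs)
       rw [h] at hle
       simp at hle ⊢
       omega)
    | simp

def re_exp_alt (cond : String) : String :=
  String.ofList (reExpGo cond.toList)

-- ===== PRECONDITION & SPEC =====
def Spec_re_exp (cond : String) (out : String) : Prop := out = re_exp_alt cond
instance (cond : String) (out : String) : Decidable (Spec_re_exp cond out) := by unfold Spec_re_exp; infer_instance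

-- ===== CLAIM (what is proved, stated in full; the proofs are below) =====
def Claim_equal_re_exp : Prop := ∀ (cond : String), Dom_re_exp cond → Spec_re_exp cond (re_exp cond)

-- ===== LEMMAS AND PROOFS =====

-- behaviour of B when the is_replace flag would be set: the pending '%' has been seen
def reExpGoR (cs : List Char) : List Char :=
  match cs.dropWhile (fun x => x = '%') with
  | [] => []
  | c2 :: rest => reExpRep c2 ++ reExpGo rest

theorem reExpGo_pct (cs : List Char) : reExpGo ('%' :: cs) = reExpGoR cs := by
  rw [reExpGo, reExpGoR]
  simp only [if_pos]
  rw [show List.dropWhile (fun x => decide (x = '%')) ('%' :: cs)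
        = List.dropWhile (fun x => decide (x = '%')) cs by simp [List.dropWhile]]
  cases List.dropWhile (fun x => decide (x = '%')) cs <;> rfl

theorem reExpGoR_pct (cs : List Char) : reExpGoR ('%' :: cs) = reExpGoR cs := by
  rw [reExpGoR, reExpGoR]
  simp [List.dropWhile]

theorem reExpGo_cons_ne (c : Char) (cs : List Char) (h : ¬ c = '%') :
    reExpGo (c :: cs) =
      if c ∈ ['(', ')', '\\', '[', ']', '-', '.'] then '\\' :: c :: reExpGo cs
      else c :: reExpGo cs := by
  rw [reExpGo]
  simp [h]

theorem reExpGoR_cons_ne (c : Char) (cs : List Char) (h : ¬ c = '%') :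
    reExpGoR (c :: cs) = reExpRep c ++ reExpGo cs := by
  rw [reExpGoR]
  simp [List.dropWhile, h]

theorem reExp_main (cs : List Char) (acc : List (List Char)) (flag : Bool) :
    (cs.foldl reExpStepA (acc, flag)).1.flatten
      = acc.flatten ++ (if flag then reExpGoR cs else reExpGo cs) := by
  induction cs generalizing acc flag with
  | nil =>
    cases flag <;> simp [reExpGo, reExpGoR, List.dropWhile]
  | cons c cs ih =>
    by_cases hc : c = '%'
    · subst hc
      have hstep : reExpStepA (acc, flag) '%' = (acc, true) := by
        simp [reExpStepA]
      simp only [List.foldl_cons, hstep, ih, reExpGo_pct, reExpGoR_pct]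
      cases flag <;> simp
    · cases flag with
      | true =>
        simp only [List.foldl_cons]
        rw [reExpGoR_cons_ne c cs hc]
        cases hv : reExpValues.get? c with
        | some v =>
          rw [show reExpStepA (acc, true) c = (acc ++ [v], false) by
            simp [reExpStepA, hc, hv], ih]
          simp [reExpRep, hv]
        | none =>
          by_cases h01 : c = '0' ∨ c = '1'
          · rw [show reExpStepA (acc, true) c = (acc ++ [['%'], [c]], false) by
              simp [reExpStepA, hc, hv, h01], ih]
            simp [reExpRep, hv, h01]
          · rw [show reExpStepA (acc, true) c = (acc, false) by
              simp [reExpStepA, hc, hv, h01], ih]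
            simp [reExpRep, hv, h01]
      | false =>
        simp only [List.foldl_cons]
        rw [reExpGo_cons_ne c cs hc]
        by_cases hs : c ∈ ['(', ')', '\\', '[', ']', '-', '.']
        · rw [show reExpStepA (acc, false) c = (acc ++ [['\\'], [c]], false) by
            simp [reExpStepA, hc, hs], ih]
          simp [hs]
        · rw [show reExpStepA (acc, false) c = (acc ++ [[c]], false) by
            simp [reExpStepA, hc, hs], ih]
          simp [hs]

-- ===== VERDICT (by name: the statement is the Claim_ definition above) =====
theorem re_exp_spec : Claim_equal_re_exp := by
  intro cond _
  unfold Spec_re_exp re_exp re_exp_alt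
  have h := reExp_main cond.toList [] false
  simp at h
  rw [h]
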